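-- pv_equiv track=rewrite | github.com/mikedasquirrel/narratio | archive/backups/transformer_backup_DEFINITIVE_20251116_141305/transformers/audio.py | _count_clusters
-- ===== SOURCE A (Python) =====
-- def _count_clusters(word: str) -> int:
--     """Count consonant clusters."""
--     vowels = set('aeiou')
--     clusters = 0
--     cluster_size = 0
--     for c in word:
--         if c not in vowels:
--             cluster_size += 1
--             if cluster_size == 2:
--                 clusters += 1
--         else:
--             cluster_size = 0
--     return clusters
-- ===== SOURCE B (Python) =====
-- from itertools import groupby
--
--
-- def _count_clusters(word: str) -> int:
--     """Count consonant clusters (maximal runs of >=2 non-vowels)."""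
--     vowels = set('aeiou')
--     return sum(1 for is_vowel, grp in groupby(word, key=lambda c: c in vowels)
--                if not is_vowel and len(list(grp)) >= 2)
-- ===== Notes on version B (the rewrite author's own statement) =====
-- stated objective: idiomatic
-- what changed: Replaces the running cluster_size counter with itertools.groupby: split the word into maximal vowel/consonant runs and count consonant runs of length >= 2.
import Mathlib
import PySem

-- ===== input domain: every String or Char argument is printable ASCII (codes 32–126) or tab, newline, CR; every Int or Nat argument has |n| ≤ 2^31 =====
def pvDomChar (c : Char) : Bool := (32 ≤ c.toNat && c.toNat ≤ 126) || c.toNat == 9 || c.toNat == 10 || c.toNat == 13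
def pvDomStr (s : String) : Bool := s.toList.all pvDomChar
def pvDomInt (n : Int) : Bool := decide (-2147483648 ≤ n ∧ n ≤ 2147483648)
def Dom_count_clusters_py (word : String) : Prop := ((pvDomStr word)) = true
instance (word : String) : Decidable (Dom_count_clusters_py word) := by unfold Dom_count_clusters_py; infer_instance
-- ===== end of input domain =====

-- B counts consonant clusters by grouping the word into maximal vowel/consonant runs (groupby)
-- and counting consonant runs of length ≥ 2, instead of A's running cluster_size counter.

-- ===== PORT A =====
-- vowels = set('aeiou')
def pvVowelsA : PySem.Set Char := PySem.Set.ofList ['a', 'e', 'i', 'o', 'u']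

-- the for-loop: state (clusters, cluster_size)
def count_clusters_py (word : String) : Int :=
  (word.toList.foldl
    (fun st c =>
      if ¬ PySem.Set.contains pvVowelsA c then
        let cs := st.2 + 1
        (if cs = 2 then st.1 + 1 else st.1, cs)
      else (st.1, 0))
    ((0 : Int), (0 : Int))).1

-- ===== PORT B =====
-- key=lambda c: c in vowels
def pvKeyB (c : Char) : Bool := c == 'a' || c == 'e' || c == 'i' || c == 'o' || c == 'u'

-- itertools.groupby: maximal runs of equal key, as (key, length-of-group) pairs
-- (Source B only uses len(list(grp)), so the group is represented by its length)
def pvGroupGo (k : Bool) (n : Int) : List Char → List (Bool × Int)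
  | [] => [(k, n)]
  | c :: cs => if pvKeyB c == k then pvGroupGo k (n + 1) cs
               else (k, n) :: pvGroupGo (pvKeyB c) 1 cs

def pvGroups : List Char → List (Bool × Int)
  | [] => []
  | c :: cs => pvGroupGo (pvKeyB c) 1 cs

-- sum(1 for is_vowel, grp in groupby(...) if not is_vowel and len(list(grp)) >= 2)
def count_clusters_py_alt (word : String) : Int :=
  ((pvGroups word.toList).countP (fun p => !p.1 && decide (2 ≤ p.2)) : Nat)

-- ===== PRECONDITION & SPEC =====
def Spec_count_clusters_py (word : String) (out : Int) : Prop := out = count_clusters_py_alt word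
instance (word : String) (out : Int) : Decidable (Spec_count_clusters_py word out) := by unfold Spec_count_clusters_py; infer_instance

-- ===== CLAIM (what is proved, stated in full; the proofs are below) =====
def Claim_equal_count_clusters_py : Prop := ∀ (word : String), Dom_count_clusters_py word → Spec_count_clusters_py word (count_clusters_py word)

-- ===== LEMMAS AND PROOFS =====

-- recursive characterisation of A's loop body
def pvAux : Int → List Char → Int
  | _, [] => 0
  | cs, c :: t =>
    if ¬ PySem.Set.contains pvVowelsA c then
      (if cs + 1 = 2 then 1 else 0) + pvAux (cs + 1) t
    else pvAux 0 t

lemma pvVowelsA_eq : pvVowelsA = ['a', 'e', 'i', 'o', 'u'] := by decide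

lemma pvVowel_mem (c : Char) : (c ∈ pvVowelsA) ↔ pvKeyB c = true := by
  simp [pvVowelsA_eq, pvKeyB]
  tauto

lemma pvAux_vowel {c : Char} (t : List Char) (cs : Int) (h : pvKeyB c = true) :
    pvAux cs (c :: t) = pvAux 0 t := by
  have h' : c ∈ pvVowelsA := (pvVowel_mem c).2 h
  simp [pvAux, PySem.Set.contains, h']

lemma pvAux_cons {c : Char} (t : List Char) (cs : Int) (h : pvKeyB c = false) :
    pvAux cs (c :: t) = (if cs + 1 = 2 then 1 else 0) + pvAux (cs + 1) t := by
  have h' : c ∉ pvVowelsA := fun hm => by simp [(pvVowel_mem c).1 hm] at h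
  simp [pvAux, PySem.Set.contains, h']

lemma pvFoldl_eq_aux (l : List Char) : ∀ (cl cs : Int),
    (l.foldl (fun st c =>
      if ¬ PySem.Set.contains pvVowelsA c then
        let n := st.2 + 1
        (if n = 2 then st.1 + 1 else st.1, n)
      else (st.1, 0)) (cl, cs)).1 = cl + pvAux cs l := by
  induction l with
  | nil => intro cl cs; simp [pvAux]
  | cons c t ih =>
    intro cl cs
    rw [List.foldl_cons]
    by_cases h : pvKeyB c = true
    · have h' : c ∈ pvVowelsA := (pvVowel_mem c).2 h
      rw [pvAux_vowel t cs h]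
      have hf : (if ¬ PySem.Set.contains pvVowelsA c then
          ((if (cl, cs).2 + 1 = 2 then (cl, cs).1 + 1 else (cl, cs).1, (cl, cs).2 + 1))
          else ((cl, cs).1, 0)) = (cl, (0 : Int)) := by
        simp [PySem.Set.contains, h']
      rw [hf, ih]
    · simp only [Bool.not_eq_true] at h
      have h' : c ∉ pvVowelsA := fun hm => by simp [(pvVowel_mem c).1 hm] at h
      rw [pvAux_cons t cs h]
      have hf : (if ¬ PySem.Set.contains pvVowelsA c then
          ((if (cl, cs).2 + 1 = 2 then (cl, cs).1 + 1 else (cl, cs).1, (cl, cs).2 + 1))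
          else ((cl, cs).1, 0)) = ((if cs + 1 = 2 then cl + 1 else cl), cs + 1) := by
        simp [PySem.Set.contains, h']
      rw [hf, ih]
      split <;> omega

def pvCnt (g : List (Bool × Int)) : Int := (g.countP (fun p => !p.1 && decide (2 ≤ p.2)) : Nat)

lemma pvCnt_nil : pvCnt [] = 0 := by simp [pvCnt]

lemma pvCnt_cons (p : Bool × Int) (g : List (Bool × Int)) :
    pvCnt (p :: g) = (if !p.1 && decide (2 ≤ p.2) then 1 else 0) + pvCnt g := by
  simp only [pvCnt, List.countP_cons]
  split <;> push_cast <;> omega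

lemma pvMain (l : List Char) :
    (∀ n : Int, 1 ≤ n → pvCnt (pvGroupGo false n l) = pvAux n l + (if 2 ≤ n then 1 else 0)) ∧
    (∀ n : Int, pvCnt (pvGroupGo true n l) = pvAux 0 l) := by
  induction l with
  | nil =>
    refine ⟨fun n hn => ?_, fun n => ?_⟩
    · simp only [pvGroupGo, pvAux]
      rw [pvCnt_cons, pvCnt_nil]
      by_cases h2 : (2 : Int) ≤ n
      · simp [h2]
      · simp [h2]
    · simp only [pvGroupGo, pvAux]
      rw [pvCnt_cons, pvCnt_nil]
      simp
  | cons c t ih =>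
    refine ⟨fun n hn => ?_, fun n => ?_⟩
    · by_cases h : pvKeyB c = true
      · -- vowel closes the consonant run
        rw [pvAux_vowel t n h]
        simp only [pvGroupGo, h]
        rw [if_neg (by decide)]
        rw [pvCnt_cons, ih.2 1]
        by_cases h2 : (2 : Int) ≤ n
        · simp [h2]; omega
        · simp [h2]
      · simp only [Bool.not_eq_true] at h
        rw [pvAux_cons t n h]
        simp only [pvGroupGo, h]
        rw [if_pos (by decide)]
        rw [ih.1 (n + 1) (by omega)]
        split <;> split <;> split <;> omega
    · by_cases h : pvKeyB c = true
      · rw [pvAux_vowel t 0 h]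
        simp only [pvGroupGo, h]
        rw [if_pos (by decide)]
        rw [ih.2 (n + 1)]
      · simp only [Bool.not_eq_true] at h
        rw [pvAux_cons t 0 h]
        simp only [pvGroupGo, h]
        rw [if_neg (by decide)]
        rw [pvCnt_cons, ih.1 1 (by omega)]
        norm_num

lemma pvTop (l : List Char) : pvAux 0 l = pvCnt (pvGroups l) := by
  cases l with
  | nil => simp [pvAux, pvGroups, pvCnt]
  | cons c t =>
    by_cases h : pvKeyB c = true
    · rw [pvAux_vowel t 0 h]
      simp only [pvGroups]
      rw [show pvKeyB c = true from h, (pvMain t).2 1]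
    · simp only [Bool.not_eq_true] at h
      rw [pvAux_cons t 0 h]
      simp only [pvGroups, h]
      rw [(pvMain t).1 1 (by omega)]
      norm_num

-- ===== VERDICT (by name: the statement is the Claim_ definition above) =====
theorem count_clusters_py_spec : Claim_equal_count_clusters_py := by
  intro word _
  unfold Spec_count_clusters_py count_clusters_py count_clusters_py_alt
  rw [pvFoldl_eq_aux, pvTop]
  simp [pvCnt]
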